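-- pv_equiv track=rewrite | github.com/harveylabis/GTx_CS1301 | codes/CHAPTER_4/Chapter_4.5_Dictionaries/Lesson_4/4.5.4_TooManyNames2.py | name_lists
-- ===== SOURCE A (Python) =====
-- def name_lists(full_names):
--     name_dict = {}
--     for name in full_names:
--         first_name = name.split()[0]
--         if not first_name in name_dict:
--            name_dict[first_name] = []
--         name_dict[first_name].append(name)
--
--     for list_names in name_dict.values():
--         list_names.sort()
--
--     return name_dict
-- ===== SOURCE B (Python) =====
-- def name_lists(full_names):
--     buckets = {}
--     for name in sorted(full_names):
--         buckets.setdefault(name.split()[0], []).append(name)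
--     return {name.split()[0]: buckets[name.split()[0]] for name in full_names}
-- ===== Notes on version B (the rewrite author's own statement) =====
-- stated objective: alternative
-- what changed: B sorts the whole list once up front and buckets the already-sorted names with setdefault, so each group is born sorted and the per-group sort pass disappears; a final dict comprehension over the original list restores A's key insertion order.
import Mathlib
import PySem

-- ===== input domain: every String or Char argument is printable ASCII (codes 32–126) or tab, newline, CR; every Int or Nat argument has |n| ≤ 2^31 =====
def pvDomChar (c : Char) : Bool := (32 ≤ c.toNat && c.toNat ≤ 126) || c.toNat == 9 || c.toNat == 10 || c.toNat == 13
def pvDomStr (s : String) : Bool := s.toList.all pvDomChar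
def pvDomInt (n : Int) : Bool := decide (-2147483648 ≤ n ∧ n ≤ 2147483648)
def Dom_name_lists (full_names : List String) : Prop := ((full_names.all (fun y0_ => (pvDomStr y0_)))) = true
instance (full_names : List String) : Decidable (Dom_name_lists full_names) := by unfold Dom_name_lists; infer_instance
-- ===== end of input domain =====

-- B sorts the full-name list once globally and buckets the sorted names, so each group
-- comes out sorted without per-group sorts; keys are re-emitted in A's insertion order.


-- name.split()[0]  (IndexError when split() is empty — excluded by Pre_; the .getD "" default is never reached there)
def pvFirst (name : String) : String := (PySem.List.pyGet? (PySem.Str.split₀ name) 0).getD ""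

-- ===== PORT A =====
def name_lists (full_names : List String) : List (String × List String) :=
  let name_dict : PySem.Dict String (List String) :=
    full_names.foldl (fun d name =>
      let first_name := pvFirst name
      let d := if d.contains first_name = false then d.insert first_name [] else d
      d.modify first_name [] (fun l => l ++ [name])) PySem.Dict.empty
  -- second loop: each value list is sorted in place
  name_dict.items.map (fun p => (p.1, PySem.List.sorted p.2 (fun x => x) false))

-- ===== PORT B =====
def name_lists_alt (full_names : List String) : List (String × List String) :=
  let buckets : PySem.Dict String (List String) :=
    (PySem.List.sorted full_names (fun x => x) false).foldl
      (fun d name => d.modify (pvFirst name) [] (fun l => l ++ [name])) PySem.Dict.empty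
  -- final dict comprehension over the original list (keys in first-occurrence order)
  (full_names.foldl (fun d name => d.insert (pvFirst name) (buckets.getD (pvFirst name) []))
    PySem.Dict.empty).items

-- ===== PRECONDITION & SPEC =====
-- Pre_ excludes exactly the names that are empty or all whitespace, where both Pythons raise IndexError on name.split()[0].
def Pre_name_lists (full_names : List String) : Prop :=
  ∀ name ∈ full_names, PySem.Str.split₀ name ≠ []
instance (full_names : List String) : Decidable (Pre_name_lists full_names) := by
  unfold Pre_name_lists; infer_instance
def pvWitness_name_lists : List String := ["Bob Smith", "Alice Jones", "Bob Adams"]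
def Spec_name_lists (full_names : List String) (out : List (String × List String)) : Prop := out = name_lists_alt full_names
instance (full_names : List String) (out : List (String × List String)) : Decidable (Spec_name_lists full_names out) := by unfold Spec_name_lists; infer_instance

-- ===== CLAIM (what is proved, stated in full; the proofs are below) =====
def Claim_equal_name_lists : Prop := ∀ (full_names : List String), Dom_name_lists full_names → Pre_name_lists full_names → Spec_name_lists full_names (name_lists full_names)

-- ===== LEMMAS AND PROOFS =====

-- the shared grouping fold
def pvGroup (l : List String) : PySem.Dict String (List String) :=
  l.foldl (fun d name => d.modify (pvFirst name) [] (fun l => l ++ [name])) PySem.Dict.empty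

lemma pvGroup_getD (l : List String) (k : String) :
    (pvGroup l).getD k [] = l.filter (fun n => pvFirst n == k) := by
  have h := PySem.Dict.getD_foldl_modify_append (l.map (fun n => (pvFirst n, n)))
    (PySem.Dict.empty (κ := String) (ν := List String)) k
  rw [List.foldl_map] at h
  simpa [pvGroup, List.filter_map, Function.comp_def] using h

lemma pvGroup_keys (l : List String) : (pvGroup l).keys = PySem.Set.ofList (l.map pvFirst) := by
  unfold pvGroup
  rw [PySem.Dict.keys_foldl_modify_key l pvFirst [] (fun _ n l => l ++ [n])]
  simp [PySem.Dict.keys_empty, PySem.Set.ofList, PySem.Set.update]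

lemma pvGroup_keys_nodup (l : List String) : (pvGroup l).keys.Nodup := by
  rw [pvGroup_keys]; exact PySem.Set.nodup_ofList _

-- A's loop body equals the plain grouping body (the "if absent: insert []" is absorbed by modify)
lemma pvStepA_eq (d : PySem.Dict String (List String)) (name : String) :
    (if d.contains (pvFirst name) = false then d.insert (pvFirst name) [] else d).modify
        (pvFirst name) [] (fun l => l ++ [name])
    = d.modify (pvFirst name) [] (fun l => l ++ [name]) := by
  by_cases h : d.contains (pvFirst name) = false
  · simp only [if_pos h, PySem.Dict.modify, PySem.Dict.getD_insert_self,
      PySem.Dict.insert_insert_self, PySem.Dict.getD_of_not_contains d _ h]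
  · simp [h]

-- sorting then filtering equals filtering then sorting (strings: equal keys are equal elements)
lemma pvSorted_filter (l : List String) (p : String → Bool) :
    PySem.List.sorted (l.filter p) (fun x => x) false
      = (PySem.List.sorted l (fun x => x) false).filter p := by
  apply PySem.List.eq_of_perm_of_pairwise_le_of_injective (fun x : String => x)
    Function.injective_id
  · exact (PySem.List.sorted_perm _ _ _).trans ((PySem.List.sorted_perm l _ _).filter p).symm
  · exact PySem.List.sorted_pairwise _ _
  · exact (PySem.List.sorted_pairwise l _).filter p

-- B's second fold: inserting a key-determined value for every name lists the distinct keys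
-- in first-occurrence order, each with its value
lemma pvInsertFold (V : String → List String) (l : List String) (S : List String)
    (hS : S.Nodup) :
    (l.foldl (fun d n => d.insert (pvFirst n) (V (pvFirst n)))
        (PySem.Dict.mk (S.map (fun k => (k, V k))))).items
      = (PySem.Set.update S (l.map pvFirst)).map (fun k => (k, V k)) := by
  induction l generalizing S with
  | nil => simp [PySem.Set.update]
  | cons n t ih =>
    have hins : (PySem.Dict.mk (S.map (fun k => (k, V k)))).insert (pvFirst n) (V (pvFirst n))
        = PySem.Dict.mk ((PySem.Set.add S (pvFirst n)).map (fun k => (k, V k))) := by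
      by_cases hmem : pvFirst n ∈ S
      · have hc : (PySem.Dict.mk (S.map (fun k => (k, V k)))).contains (pvFirst n) = true := by
          simp [PySem.Dict.contains, List.any_map, Function.comp_def]
          exact hmem
        have hadd : PySem.Set.add S (pvFirst n) = S := by
          simp [PySem.Set.add]
          exact hmem
        rw [PySem.Dict.insert, if_pos hc, hadd]
        congr 1
        rw [List.map_map]
        refine List.map_congr_left (fun k hk => ?_)
        by_cases hkn : k = pvFirst n
        · subst hkn; simp
        · simp [hkn]
      · have hc : (PySem.Dict.mk (S.map (fun k => (k, V k)))).contains (pvFirst n) = false := by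
          simp [PySem.Dict.contains, List.any_map, Function.comp_def]
          exact fun x hx he => hmem (he ▸ hx)
        have hadd : PySem.Set.add S (pvFirst n) = S ++ [pvFirst n] := by
          simp [PySem.Set.add]
          intro hmem'
          exact absurd hmem' hmem
        rw [PySem.Dict.insert, if_neg (by simp [hc]), hadd]
        simp
    rw [List.foldl_cons, hins, List.map_cons]
    have hS' : (PySem.Set.add S (pvFirst n)).Nodup := PySem.Set.nodup_add S (pvFirst n) hS
    rw [ih _ hS']
    rfl

-- ===== VERDICT (by name: the statement is the Claim_ definition above) =====
theorem name_lists_spec : Claim_equal_name_lists := by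
  intro full_names _ _
  unfold Spec_name_lists name_lists name_lists_alt
  simp only [pvStepA_eq]
  have hA : full_names.foldl
      (fun d name => d.modify (pvFirst name) [] (fun l => l ++ [name])) PySem.Dict.empty
      = pvGroup full_names := rfl
  rw [hA, PySem.Dict.items_eq_map_keys _ (pvGroup_keys_nodup _) [], List.map_map]
  have hB := pvInsertFold
    (fun k => (pvGroup (PySem.List.sorted full_names (fun x => x) false)).getD k [])
    full_names [] List.nodup_nil
  simp only [List.map_nil, pvGroup,
    show PySem.Dict.mk ([] : List (String × List String)) = PySem.Dict.empty from rfl] at hB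
  rw [hB, pvGroup_keys,
    show PySem.Set.update ([] : List String) (full_names.map pvFirst)
        = PySem.Set.ofList (full_names.map pvFirst) from rfl]
  have hg : ∀ l, List.foldl (fun d name => d.modify (pvFirst name) [] (fun l => l ++ [name]))
      PySem.Dict.empty l = pvGroup l := fun _ => rfl
  refine List.map_congr_left fun k _ => ?_
  simp only [Function.comp_def, hg, pvGroup_getD, pvSorted_filter]
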